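-- pv_equiv track=rewrite | github.com/polydbms/xdbc-client | experiments/model_optimizer/Stopping_Rules.py | no_improvement_stopping_rule
-- ===== SOURCE A (Python) =====
-- def no_improvement_stopping_rule(trial_history, iterations, mode="min"):
--     """
--     Stops the optimization run if there has been no improvement for 'iterations' iterations.
--
--     Parameters:
--         trial_history (list): The result values of the optimization run up to the current iteration.
--         iterations (int): Number of consecutive iterations without improvement allowed.
--         mode (str): "min" for minimizing objective, "max" for maximizing objective.
--
--     Returns:
--         bool: True if the optimization run should stop, False otherwise.
--     """
--     if len(trial_history) <= iterations:
--         return False  # Not enough data to check for improvement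
--
--     # Determine the best value seen so far
--     if mode == "min":
--         best_value = min(trial_history[:-iterations])
--         # Check if the recent values show no improvement
--         return all(result >= best_value for result in trial_history[-iterations:])
--     elif mode == "max":
--         best_value = max(trial_history[:-iterations])
--         # Check if the recent values show no improvement
--         return all(result <= best_value for result in trial_history[-iterations:])
-- ===== SOURCE B (Python) =====
-- def no_improvement_stopping_rule(trial_history, iterations, mode="min"):
--     if len(trial_history) <= iterations:
--         return False
--     cutoff = len(trial_history) - iterations
--     if mode == "min":
--         return trial_history.index(min(trial_history)) < cutoff
--     if mode == "max":
--         return trial_history.index(max(trial_history)) < cutoff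
-- ===== Notes on version B (the rewrite author's own statement) =====
-- stated objective: simpler
-- what changed: A computes the extremum of the prefix and then scans the suffix comparing every recent value against it; B computes the global extremum of the whole history once and compares its first index with len(trial_history) - iterations, replacing the prefix-extremum-plus-suffix-scan with a single position check.
-- outside the precondition, e.g. on no_improvement_stopping_rule([1, 2], 1, 'avg'): A returns None, B returns None; on no_improvement_stopping_rule([2, 1], -1, 'min'): A returns False, B returns True; on no_improvement_stopping_rule([1], 0, 'min'): A raises ValueError, B returns True
import Mathlib
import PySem

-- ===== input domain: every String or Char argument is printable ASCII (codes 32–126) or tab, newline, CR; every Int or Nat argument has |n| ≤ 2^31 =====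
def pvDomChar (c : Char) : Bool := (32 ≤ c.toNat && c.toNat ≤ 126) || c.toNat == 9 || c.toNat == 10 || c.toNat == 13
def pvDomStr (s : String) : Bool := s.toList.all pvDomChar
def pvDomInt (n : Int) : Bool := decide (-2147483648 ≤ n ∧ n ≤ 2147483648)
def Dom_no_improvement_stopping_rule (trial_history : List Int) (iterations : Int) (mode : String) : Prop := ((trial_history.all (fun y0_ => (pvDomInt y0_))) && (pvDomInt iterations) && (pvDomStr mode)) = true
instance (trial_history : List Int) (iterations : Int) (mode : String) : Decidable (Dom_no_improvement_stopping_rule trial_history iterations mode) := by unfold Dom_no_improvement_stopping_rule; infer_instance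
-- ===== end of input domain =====

-- B replaces A's prefix-extremum-plus-suffix-scan with a single global extremum whose first index is
-- compared with the prefix length (objective: simpler; same O(n) cost).

-- ===== PORT A =====

def no_improvement_stopping_rule (trial_history : List Int) (iterations : Int) (mode : String) : Bool :=
  if (trial_history.length : Int) ≤ iterations then false
  else if mode = "min" then
    match PySem.List.min? (PySem.List.slice trial_history none (some (-iterations))) (fun x => x) with
    | none => false
    | some best_value =>
        (PySem.List.slice trial_history (some (-iterations)) none).all (fun result => best_value ≤ result)
  else if mode = "max" then
    match PySem.List.max? (PySem.List.slice trial_history none (some (-iterations))) (fun x => x) with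
    | none => false
    | some best_value =>
        (PySem.List.slice trial_history (some (-iterations)) none).all (fun result => result ≤ best_value)
  else false

-- ===== PORT B =====
def no_improvement_stopping_rule_alt (trial_history : List Int) (iterations : Int) (mode : String) : Bool :=
  if (trial_history.length : Int) ≤ iterations then false
  else
    let cutoff : Int := (trial_history.length : Int) - iterations
    if mode = "min" then
      match PySem.List.min? trial_history (fun x => x) with
      | none => false
      | some m =>
        match PySem.List.index? trial_history m with
        | none => false
        | some k => decide ((k : Int) < cutoff)
    else if mode = "max" then
      match PySem.List.max? trial_history (fun x => x) with
      | none => false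
      | some m =>
        match PySem.List.index? trial_history m with
        | none => false
        | some k => decide ((k : Int) < cutoff)
    else false


-- ===== PRECONDITION & SPEC =====
-- Pre_ excludes inputs on which A does not return a bool or that lie outside the natural domain:
-- (a) unknown modes with enough data, where A falls off the end and returns None (not a bool);
-- (b) iterations = 0 with a nonempty history, where A raises ValueError on min([]); (c) negative
-- iteration counts, outside the natural domain of an 'allowed iterations without improvement' rule.
def Pre_no_improvement_stopping_rule (trial_history : List Int) (iterations : Int) (mode : String) : Prop :=
  (trial_history.length : Int) ≤ iterations ∨ ((mode = "min" ∨ mode = "max") ∧ 1 ≤ iterations)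
instance (trial_history : List Int) (iterations : Int) (mode : String) : Decidable (Pre_no_improvement_stopping_rule trial_history iterations mode) := by unfold Pre_no_improvement_stopping_rule; infer_instance

def pvWitness_no_improvement_stopping_rule : List Int × Int × String := ([3, 1, 2, 2], 2, "min")

def Spec_no_improvement_stopping_rule (trial_history : List Int) (iterations : Int) (mode : String) (out : Bool) : Prop := out = no_improvement_stopping_rule_alt trial_history iterations mode
instance (trial_history : List Int) (iterations : Int) (mode : String) (out : Bool) : Decidable (Spec_no_improvement_stopping_rule trial_history iterations mode out) := by unfold Spec_no_improvement_stopping_rule; infer_instance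

-- ===== CLAIM (what is proved, stated in full; the proofs are below) =====
def Claim_equal_no_improvement_stopping_rule : Prop := ∀ (trial_history : List Int) (iterations : Int) (mode : String), Dom_no_improvement_stopping_rule trial_history iterations mode → Pre_no_improvement_stopping_rule trial_history iterations mode → Spec_no_improvement_stopping_rule trial_history iterations mode (no_improvement_stopping_rule trial_history iterations mode)

-- ===== LEMMAS AND PROOFS =====

-- Core equivalence, "min" side: over xs = pre ++ suf, "every element of suf is ≥ the minimum of pre"
-- holds exactly when the first occurrence of the global minimum lies inside pre.
lemma min_side (pre suf : List Int) (b m : Int) (j : Nat)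
    (hb : PySem.List.min? pre (fun x => x) = some b)
    (hm : PySem.List.min? (pre ++ suf) (fun x => x) = some m)
    (hj : PySem.List.index? (pre ++ suf) m = some j) :
    (suf.all (fun r => b ≤ r)) = decide (j < pre.length) := by
  have hbmem : b ∈ pre := PySem.List.min?_mem hb
  have hbmin := PySem.List.min?_isMin hb
  have hmmin := PySem.List.min?_isMin hm
  obtain ⟨hjlt, hget, hfirst⟩ := PySem.List.getElem_of_index?_eq_some hj
  simp only at hbmin hmmin
  rw [Bool.eq_iff_iff]
  simp only [List.all_eq_true, decide_eq_true_eq]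
  constructor
  · intro hall
    by_contra hge
    push Not at hge
    have hmsuf : m ∈ suf := by
      have he : (pre ++ suf)[j] = suf[j - pre.length]'(by simp at hjlt; omega) :=
        List.getElem_append_right hge
      rw [he] at hget
      exact hget ▸ List.getElem_mem _
    have hmb : m = b := le_antisymm (hmmin b (List.mem_append_left _ hbmem)) (hall m hmsuf)
    obtain ⟨i, hi, hgi⟩ := List.getElem_of_mem (hmb ▸ hbmem)
    have : (pre ++ suf)[i]'(by simp; omega) = m := by
      rw [List.getElem_append_left hi]; exact hgi
    exact hfirst i (by omega) this
  · intro hjlt'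
    have hmpre : m ∈ pre := by
      have he : (pre ++ suf)[j] = pre[j]'hjlt' := List.getElem_append_left hjlt'
      rw [he] at hget
      exact hget ▸ List.getElem_mem _
    intro r hr
    exact le_trans (hbmin m hmpre) (hmmin r (List.mem_append_right _ hr))

-- "max" side, mirror image.
lemma max_side (pre suf : List Int) (b m : Int) (j : Nat)
    (hb : PySem.List.max? pre (fun x => x) = some b)
    (hm : PySem.List.max? (pre ++ suf) (fun x => x) = some m)
    (hj : PySem.List.index? (pre ++ suf) m = some j) :
    (suf.all (fun r => r ≤ b)) = decide (j < pre.length) := by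
  have hbmem : b ∈ pre := PySem.List.max?_mem hb
  have hbmax := PySem.List.max?_isMax hb
  have hmmax := PySem.List.max?_isMax hm
  obtain ⟨hjlt, hget, hfirst⟩ := PySem.List.getElem_of_index?_eq_some hj
  simp only at hbmax hmmax
  rw [Bool.eq_iff_iff]
  simp only [List.all_eq_true, decide_eq_true_eq]
  constructor
  · intro hall
    by_contra hge
    push Not at hge
    have hmsuf : m ∈ suf := by
      have he : (pre ++ suf)[j] = suf[j - pre.length]'(by simp at hjlt; omega) :=
        List.getElem_append_right hge
      rw [he] at hget
      exact hget ▸ List.getElem_mem _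
    have hmb : m = b := le_antisymm (hall m hmsuf) (hmmax b (List.mem_append_left _ hbmem))
    obtain ⟨i, hi, hgi⟩ := List.getElem_of_mem (hmb ▸ hbmem)
    have : (pre ++ suf)[i]'(by simp; omega) = m := by
      rw [List.getElem_append_left hi]; exact hgi
    exact hfirst i (by omega) this
  · intro hjlt'
    have hmpre : m ∈ pre := by
      have he : (pre ++ suf)[j] = pre[j]'hjlt' := List.getElem_append_left hjlt'
      rw [he] at hget
      exact hget ▸ List.getElem_mem _
    intro r hr
    exact le_trans (hmmax r (List.mem_append_right _ hr)) (hbmax m hmpre)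


-- ===== VERDICT (by name: the statement is the Claim_ definition above) =====
theorem no_improvement_stopping_rule_spec : Claim_equal_no_improvement_stopping_rule := by
  intro xs it mode _ hpre
  unfold Spec_no_improvement_stopping_rule
  unfold Pre_no_improvement_stopping_rule at hpre
  unfold no_improvement_stopping_rule no_improvement_stopping_rule_alt
  by_cases hle : (xs.length : Int) ≤ it
  · simp [hle]
  · simp only [hle, if_false]
    obtain ⟨hmode, hit⟩ : (mode = "min" ∨ mode = "max") ∧ 1 ≤ it := by
      rcases hpre with h | h
      · exact absurd h hle
      · exact h
    obtain ⟨k, hk⟩ : ∃ k : Nat, it = (k : Int) := ⟨it.toNat, by omega⟩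
    subst hk
    have hk1 : 0 < k := by omega
    have hklen : k < xs.length := by omega
    rw [PySem.List.slice_to_neg_natCast xs k hk1, PySem.List.slice_from_neg_natCast xs k hk1]
    have hsplit : xs.take (xs.length - k) ++ xs.drop (xs.length - k) = xs := List.take_append_drop _ _
    have hprelen : (xs.take (xs.length - k)).length = xs.length - k := by
      rw [List.length_take]; omega
    have hprene : xs.take (xs.length - k) ≠ [] := by
      intro h; rw [h] at hprelen; simp at hprelen; omega
    -- existence of min?/max?/index?
    rcases hmode with hmode | hmode <;> subst hmode <;> simp only [reduceIte, String.reduceEq]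
    · cases hmp : PySem.List.min? (xs.take (xs.length - k)) (fun x => x) with
      | none => rw [PySem.List.min?_eq_none_iff] at hmp; exact absurd hmp hprene
      | some b =>
        cases hmx : PySem.List.min? xs (fun x => x) with
        | none =>
          rw [PySem.List.min?_eq_none_iff] at hmx
          subst hmx; simp at hklen
        | some m =>
          cases hix : PySem.List.index? xs m with
          | none =>
            rw [PySem.List.index?_eq_none_iff] at hix
            exact absurd (PySem.List.min?_mem hmx) hix
          | some j =>
            simp only [hix]
            have hmx' := hmx; have hix' := hix
            rw [← hsplit] at hmx' hix'
            have heq := min_side _ _ b m j hmp hmx' hix'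
            rw [hprelen] at heq
            show ((xs.drop (xs.length - k)).all fun r => decide (b ≤ r)) = decide ((j : Int) < (xs.length : Int) - (k : Int))
            rw [heq, decide_eq_decide]
            omega
    · cases hmp : PySem.List.max? (xs.take (xs.length - k)) (fun x => x) with
      | none => rw [PySem.List.max?_eq_none_iff] at hmp; exact absurd hmp hprene
      | some b =>
        cases hmx : PySem.List.max? xs (fun x => x) with
        | none =>
          rw [PySem.List.max?_eq_none_iff] at hmx
          subst hmx; simp at hklen
        | some m =>
          cases hix : PySem.List.index? xs m with
          | none =>
            rw [PySem.List.index?_eq_none_iff] at hix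
            exact absurd (PySem.List.max?_mem hmx) hix
          | some j =>
            simp only [hix]
            have hmx' := hmx; have hix' := hix
            rw [← hsplit] at hmx' hix'
            have heq := max_side _ _ b m j hmp hmx' hix'
            rw [hprelen] at heq
            show ((xs.drop (xs.length - k)).all fun r => decide (r ≤ b)) = decide ((j : Int) < (xs.length : Int) - (k : Int))
            rw [heq, decide_eq_decide]
            omega
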